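-- pv_equiv track=rewrite | github.com/xkunD/datascience-cw | template.py | find_regular_zombies
-- ===== SOURCE A (Python) =====
-- def find_regular_zombies(contacts_dic, zombie_list):
--     """Return list of sick people that contacted with both potential zombies
--        and people who are already sick.
--
--     Args:
--         contacts_dic (dic): each entry is a sick person's name and their list
--         of contacts.
--         zombie_list (list): all zombies
--
--     Returns:
--         list: contains the names of sick people who contacted with both
--         potential zombies and other sick people.
--     """
--     regular_zombies_list = []
--     patients_list = contacts_dic.keys()
--
--     for patient, contacts in contacts_dic.items():
--         # check if this patient contacted with other patients / zombies
--         contact_with_patient = set(patients_list).intersection(contacts)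
--         contact_with_zombie = set(zombie_list).intersection(contacts)
--         # if has contacts with both:
--         if contact_with_patient and contact_with_zombie:
--             regular_zombies_list.append(patient)
--
--     return regular_zombies_list
-- ===== SOURCE B (Python) =====
-- def find_regular_zombies(contacts_dic, zombie_list):
--     # One classification map built once: bit 1 = "is a patient", bit 2 = "is a zombie".
--     category = {z: 2 for z in zombie_list}
--     for p in contacts_dic:
--         category[p] = category.get(p, 0) | 1
--
--     def mask(contacts):
--         # OR-fold the categories of the contacts, saturating at 3
--         m = 0
--         for c in contacts:
--             m |= category.get(c, 0)
--             if m == 3: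
--                 break
--         return m
--
--     return [p for p, cs in contacts_dic.items() if mask(cs) == 3]
-- ===== Notes on version B (the rewrite author's own statement) =====
-- stated objective: faster
-- what changed: B replaces A's two per-patient set constructions and intersections by one bitmask classification dict (bit1=patient, bit2=zombie) built once, and per patient a single saturating OR-fold over the contact list that stops at mask 3; a final comprehension filters the keys.
import Mathlib
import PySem

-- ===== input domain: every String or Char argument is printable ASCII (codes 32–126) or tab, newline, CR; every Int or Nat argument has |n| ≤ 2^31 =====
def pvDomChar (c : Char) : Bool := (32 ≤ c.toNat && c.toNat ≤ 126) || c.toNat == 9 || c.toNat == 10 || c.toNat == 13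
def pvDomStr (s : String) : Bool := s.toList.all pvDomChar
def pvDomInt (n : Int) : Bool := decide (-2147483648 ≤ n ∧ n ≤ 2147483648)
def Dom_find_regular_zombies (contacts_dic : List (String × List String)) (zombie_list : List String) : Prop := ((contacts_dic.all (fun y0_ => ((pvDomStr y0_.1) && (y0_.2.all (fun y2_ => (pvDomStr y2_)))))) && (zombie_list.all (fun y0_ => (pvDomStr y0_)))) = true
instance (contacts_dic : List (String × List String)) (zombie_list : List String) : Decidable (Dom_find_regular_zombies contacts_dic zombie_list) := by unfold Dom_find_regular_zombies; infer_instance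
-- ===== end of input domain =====

-- B replaces A's two per-patient set intersections by ONE bitmask classification dict
-- (bit 1 = patient, bit 2 = zombie) built once; each contact list is reduced by a single
-- saturating OR-fold that stops at mask 3, and a comprehension filters the keys.

-- ===== PORT A =====
def find_regular_zombies (contacts_dic : List (String × List String)) (zombie_list : List String) : List String :=
  let patients_list := contacts_dic.map Prod.fst
  contacts_dic.foldl (fun regular_zombies_list pc =>
    let contact_with_patient := PySem.Set.inter (PySem.Set.ofList patients_list) pc.2
    let contact_with_zombie := PySem.Set.inter (PySem.Set.ofList zombie_list) pc.2
    if contact_with_patient ≠ [] ∧ contact_with_zombie ≠ [] then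
      regular_zombies_list ++ [pc.1]
    else regular_zombies_list) []

-- ===== PORT B =====
-- Source B's inner 'mask' helper: OR-fold of the contacts' categories, early break at 3
def pvMaskB (category : PySem.Dict String Int) : List String → Int → Int
  | [], m => m
  | c :: cs, m =>
    let m' := Int.lor m (category.getD c 0)
    if m' == 3 then m' else pvMaskB category cs m'

def find_regular_zombies_alt (contacts_dic : List (String × List String)) (zombie_list : List String) : List String :=
  let cat0 : PySem.Dict String Int := zombie_list.foldl (fun d z => d.insert z 2) PySem.Dict.empty
  let category := (contacts_dic.map Prod.fst).foldl
    (fun d p => d.insert p (Int.lor (d.getD p 0) 1)) cat0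
  (contacts_dic.filter (fun pc => pvMaskB category pc.2 0 == 3)).map Prod.fst

-- ===== PRECONDITION & SPEC =====
def Spec_find_regular_zombies (contacts_dic : List (String × List String)) (zombie_list : List String) (out : List String) : Prop := out = find_regular_zombies_alt contacts_dic zombie_list
instance (contacts_dic : List (String × List String)) (zombie_list : List String) (out : List String) : Decidable (Spec_find_regular_zombies contacts_dic zombie_list out) := by unfold Spec_find_regular_zombies; infer_instance

-- ===== CLAIM =====
def Claim_equal_find_regular_zombies : Prop := ∀ (contacts_dic : List (String × List String)) (zombie_list : List String), Dom_find_regular_zombies contacts_dic zombie_list → Spec_find_regular_zombies contacts_dic zombie_list (find_regular_zombies contacts_dic zombie_list)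

-- ===== LEMMAS AND PROOFS =====

-- encoding of the two classification bits as the bitmask B manipulates
def pvEnc (a b : Bool) : Int := (if a then 1 else 0) + (if b then 2 else 0)

theorem pvEnc_lor (a b a' b' : Bool) : Int.lor (pvEnc a b) (pvEnc a' b') = pvEnc (a || a') (b || b') := by
  cases a <;> cases b <;> cases a' <;> cases b' <;> decide

theorem pvEnc_beq_three (a b : Bool) : (pvEnc a b == 3) = (a && b) := by
  cases a <;> cases b <;> decide

-- the zombie dict-comprehension: value 2 exactly on the zombies
theorem pv_catZ (zl : List String) (d : PySem.Dict String Int) (c : String) :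
    (zl.foldl (fun d z => d.insert z 2) d).getD c 0 =
      if zl.contains c then 2 else d.getD c 0 := by
  induction zl generalizing d with
  | nil => simp
  | cons z zl ih =>
    simp only [List.foldl_cons, ih, List.contains_cons]
    by_cases h : zl.contains c
    · have hm : c ∈ zl := by simpa using h
      simp [hm]
    · have hm : c ∉ zl := by simpa using h
      by_cases hc : c = z
      · simp [hm, hc, PySem.Dict.getD_insert]
      · simp [hm, PySem.Dict.getD_insert, hc]

-- dicts whose stored masks are small
def pvGood (d : PySem.Dict String Int) : Prop :=
  ∀ k, d.getD k 0 = 0 ∨ d.getD k 0 = 1 ∨ d.getD k 0 = 2 ∨ d.getD k 0 = 3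

-- the patient loop ORs bit 1 onto exactly the keys
theorem pv_catP (ps : List String) (d : PySem.Dict String Int) (hd : pvGood d) (c : String) :
    (ps.foldl (fun d p => d.insert p (Int.lor (d.getD p 0) 1)) d).getD c 0 =
      if ps.contains c then Int.lor (d.getD c 0) 1 else d.getD c 0 := by
  induction ps generalizing d with
  | nil => simp
  | cons p ps ih =>
    have hd' : pvGood (d.insert p (Int.lor (d.getD p 0) 1)) := by
      intro k
      rw [PySem.Dict.getD_insert]
      split
      · rcases hd p with h | h | h | h <;> rw [h] <;> decide
      · exact hd k
    simp only [List.foldl_cons, ih _ hd', List.contains_cons]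
    by_cases hc : c = p
    · subst hc
      have hidem : Int.lor (Int.lor (d.getD c 0) 1) 1 = Int.lor (d.getD c 0) 1 := by
        rcases hd c with h | h | h | h <;> rw [h] <;> decide
      by_cases hs : ps.contains c <;>
        simp [PySem.Dict.getD_insert, hs, hidem]
    · simp [PySem.Dict.getD_insert, hc]

-- the built category dict classifies every name by the two membership bits
theorem pv_category (contacts_dic : List (String × List String)) (zl : List String) (c : String) :
    ((contacts_dic.map Prod.fst).foldl (fun d p => d.insert p (Int.lor (d.getD p 0) 1))
        (zl.foldl (fun d z => d.insert z 2) PySem.Dict.empty)).getD c 0 =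
      pvEnc ((contacts_dic.map Prod.fst).contains c) (zl.contains c) := by
  have hg : pvGood (zl.foldl (fun d z => d.insert z 2) PySem.Dict.empty) := by
    intro k; rw [pv_catZ]; split <;> simp
  rw [pv_catP _ _ hg]
  simp only [pv_catZ, PySem.Dict.getD_empty]
  by_cases hp : c ∈ contacts_dic.map Prod.fst <;>
    by_cases hz : c ∈ zl <;> simp [hp, hz, pvEnc, List.contains_eq_mem] <;> decide

-- the early-break OR-fold computes the two 'any' bits
theorem pvMaskB_eq (cat : PySem.Dict String Int) (pc zc : String → Bool)
    (hcat : ∀ c, cat.getD c 0 = pvEnc (pc c) (zc c)) (cs : List String) (a b : Bool) :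
    pvMaskB cat cs (pvEnc a b) = pvEnc (a || cs.any pc) (b || cs.any zc) := by
  induction cs generalizing a b with
  | nil => simp [pvMaskB]
  | cons c cs ih =>
    simp only [pvMaskB, hcat c, pvEnc_lor, List.any_cons]
    rw [pvEnc_beq_three]
    split
    · rename_i h
      simp only [Bool.and_eq_true] at h
      rw [← Bool.or_assoc, ← Bool.or_assoc, h.1, h.2]
      simp
    · rw [ih]
      simp [Bool.or_assoc]

-- A's per-patient test: both intersections nonempty ↔ both 'any' bits set
theorem pv_inter_ne_nil (s cs : List String) :
    PySem.Set.inter (PySem.Set.ofList s) cs ≠ [] ↔ cs.any s.contains = true := by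
  constructor
  · intro h
    rcases List.exists_mem_of_ne_nil _ h with ⟨x, hx⟩
    rw [PySem.Set.mem_inter] at hx
    simp only [List.any_eq_true, List.contains_eq_mem, decide_eq_true_eq]
    exact ⟨x, hx.2, (PySem.Set.mem_ofList _ _).mp hx.1⟩
  · intro h
    simp only [List.any_eq_true, List.contains_eq_mem, decide_eq_true_eq] at h
    rcases h with ⟨x, hx1, hx2⟩
    exact List.ne_nil_of_mem ((PySem.Set.mem_inter _ _ _).mpr
      ⟨(PySem.Set.mem_ofList _ _).mpr hx2, hx1⟩)

-- ===== VERDICT =====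
theorem find_regular_zombies_spec : Claim_equal_find_regular_zombies := by
  intro contacts_dic zombie_list _
  unfold Spec_find_regular_zombies find_regular_zombies find_regular_zombies_alt
  rw [PySem.List.foldl_append_ite
    (p := fun pc => PySem.Set.inter (PySem.Set.ofList (contacts_dic.map Prod.fst)) pc.2 ≠ [] ∧
                    PySem.Set.inter (PySem.Set.ofList zombie_list) pc.2 ≠ [])
    (f := Prod.fst)]
  simp only [List.nil_append]
  congr 1
  apply List.filter_congr
  intro pc _
  have hmask := pvMaskB_eq
    ((contacts_dic.map Prod.fst).foldl (fun d p => d.insert p (Int.lor (d.getD p 0) 1))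
      (zombie_list.foldl (fun d z => d.insert z 2) PySem.Dict.empty))
    (fun c => (contacts_dic.map Prod.fst).contains c) (fun c => zombie_list.contains c)
    (fun c => pv_category contacts_dic zombie_list c) pc.2 false false
  have h0 : pvEnc false false = (0 : Int) := by decide
  rw [h0] at hmask
  simp only [Bool.false_or] at hmask
  simp only [hmask, pvEnc_beq_three]
  rw [Bool.eq_iff_iff]
  simp only [Bool.and_eq_true, decide_eq_true_eq]
  rw [pv_inter_ne_nil, pv_inter_ne_nil]
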